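-- pv_equiv track=rewrite | github.com/Jaeookk/algorithm | 구현/택배상자.py | solution
-- ===== SOURCE A (Python) =====
-- def solution(order):
--     temp = []
--     idx = 0
--     belt = 1
--     while belt <= len(order):
--         temp.append(belt)
--         while temp[-1] == order[idx]:
--             idx += 1
--             temp.pop()
--             if len(temp) == 0:
--                 break
--         belt += 1
--
--
--     return idx
-- ===== SOURCE B (Python) =====
-- def solution(order):
--     # Lazy (demand-driven) simulation: iterate over the targets in `order`,
--     # pushing belt boxes onto the stack only when the next target requires it.
--     temp = []
--     belt = 1
--     count = 0
--     n = len(order)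
--     for target in order:
--         if temp and temp[-1] == target:
--             temp.pop()
--             count += 1
--             continue
--         while belt <= n and belt != target:
--             temp.append(belt)
--             belt += 1
--         if belt <= n:
--             belt += 1
--             count += 1
--         else:
--             break
--     return count
-- ===== Notes on version B (the rewrite author's own statement) =====
-- stated objective: alternative
-- what changed: A eagerly pushes every belt box 1..n and pops matching targets after each push; B iterates over the target sequence itself with a demand-driven belt pointer, popping a matching stack top or lazily pushing belt boxes only until the wanted box appears, stopping when the belt is exhausted.
import Mathlib
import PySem

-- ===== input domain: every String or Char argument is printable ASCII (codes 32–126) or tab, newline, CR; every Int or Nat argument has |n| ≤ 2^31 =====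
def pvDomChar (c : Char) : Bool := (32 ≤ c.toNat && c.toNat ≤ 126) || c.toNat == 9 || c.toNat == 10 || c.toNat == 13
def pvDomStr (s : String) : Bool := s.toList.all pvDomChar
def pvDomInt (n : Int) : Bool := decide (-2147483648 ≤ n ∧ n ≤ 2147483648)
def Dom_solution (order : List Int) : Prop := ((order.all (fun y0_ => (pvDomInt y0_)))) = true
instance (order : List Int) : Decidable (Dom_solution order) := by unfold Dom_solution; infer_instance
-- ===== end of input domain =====

-- B replaces A's eager belt loop (push every box, then pop matches) by a demand-driven
-- loop over the target sequence itself, pushing belt boxes only when the next target needs them;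
-- objective: alternative decomposition of the same O(n) stack simulation.

-- ===== PORT A =====
-- inner `while temp[-1] == order[idx]` loop of A (pops while the stack top matches the
-- next wanted box; `temp ≠ []` guards the `temp[-1]` access, which A never reaches empty)
def popLoopA (order : List Int) (temp : List Int) (idx : Nat) : List Int × Nat :=
  if temp ≠ [] ∧ temp.getLast? = PySem.List.pyGet? order (idx : Int) then
    let temp' := temp.dropLast
    if temp' = [] then (temp', idx + 1)
    else popLoopA order temp' (idx + 1)
  else (temp, idx)
termination_by temp.length
decreasing_by
  rename_i h _
  have : temp ≠ [] := h.1
  simpa [List.length_dropLast] using Nat.sub_lt (List.length_pos_iff.mpr this) Nat.one_pos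

-- outer `while belt <= len(order)` loop of A
def loopA (order : List Int) (temp : List Int) (idx : Nat) (belt : Nat) : Nat :=
  if belt ≤ order.length then
    let p := popLoopA order (temp ++ [(belt : Int)]) idx
    loopA order p.1 p.2 (belt + 1)
  else idx
termination_by order.length + 1 - belt

def solution (order : List Int) : Int := (loopA order [] 0 1 : Nat)

-- ===== PORT B =====
-- inner `while belt <= n and belt != target` loop of B (push belt boxes up to the target)
def pushLoopB (n : Nat) (target : Int) (temp : List Int) (belt : Nat) : List Int × Nat :=
  if belt ≤ n ∧ (belt : Int) ≠ target then
    pushLoopB n target (temp ++ [(belt : Int)]) (belt + 1)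
  else (temp, belt)
termination_by n + 1 - belt

-- `for target in order` loop of B
def loopB (n : Nat) : List Int → List Int → Nat → Nat → Nat
  | [], _, _, count => count
  | target :: rest, temp, belt, count =>
    if temp.getLast? = some target then
      loopB n rest temp.dropLast belt (count + 1)
    else
      let p := pushLoopB n target temp belt
      if p.2 ≤ n then loopB n rest p.1 (p.2 + 1) (count + 1)
      else count

def solution_alt (order : List Int) : Int := (loopB order.length order [] 1 0 : Nat)

-- ===== PRECONDITION & SPEC =====
def Spec_solution (order : List Int) (out : Int) : Prop := out = solution_alt order
instance (order : List Int) (out : Int) : Decidable (Spec_solution order out) := by unfold Spec_solution; infer_instance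

-- ===== CLAIM (what is proved, stated in full; the proofs are below) =====
def Claim_equal_solution : Prop := ∀ (order : List Int), Dom_solution order → Spec_solution order (solution order)

-- ===== LEMMAS AND PROOFS =====

-- After A's inner pop loop the stack is empty or its top no longer matches the next wanted box.
lemma popLoopA_post (order : List Int) (temp : List Int) (idx : Nat) :
    (popLoopA order temp idx).1 = [] ∨
    (popLoopA order temp idx).1.getLast? ≠ PySem.List.pyGet? order ((popLoopA order temp idx).2 : Int) := by
  induction temp, idx using popLoopA.induct order with
  | case1 temp idx h temp' h2 =>
      rw [popLoopA, if_pos h, if_pos h2]; left; exact h2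
  | case2 temp idx h temp' h2 ih =>
      rw [popLoopA, if_pos h, if_neg h2]; exact ih
  | case3 temp idx h =>
      rw [popLoopA, if_neg h]
      rcases not_and_or.mp h with h1 | h2
      · left; simpa using h1
      · right; exact h2

-- one matching pop: B consumes the head target by popping the stack top
lemma step_pop (order : List Int) (n : Nat) (temp : List Int) (idx : Nat) (β : Nat)
    (hne : temp ≠ []) (hm : temp.getLast? = PySem.List.pyGet? order (idx : Nat)) :
    loopB n (order.drop idx) temp β idx =
    loopB n (order.drop (idx + 1)) temp.dropLast β (idx + 1) := by
  obtain ⟨x, hx⟩ : ∃ x, temp.getLast? = some x := by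
    cases hl : temp.getLast? with
    | none => exact absurd (List.getLast?_eq_none_iff.mp hl) hne
    | some v => exact ⟨v, rfl⟩
  have hg : order[idx]? = some x := by rw [← PySem.List.pyGet?_natCast, ← hm, hx]
  have hidx : idx < order.length := by
    by_contra hc
    rw [List.getElem?_eq_none (Nat.le_of_not_lt hc)] at hg; simp at hg
  have hox : order[idx] = x := by
    rw [List.getElem?_eq_getElem hidx] at hg; exact Option.some.inj hg
  rw [List.drop_eq_getElem_cons hidx, loopB, if_pos (by rw [hx, hox])]

-- B's loop simulates A's inner pop loop: the pops A performs are exactly the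
-- top-of-stack matches B consumes, target by target, with count tracking idx.
lemma pop_sim (order : List Int) (n : Nat) (temp : List Int) (idx : Nat) (β : Nat) :
    loopB n (order.drop idx) temp β idx =
    loopB n (order.drop (popLoopA order temp idx).2) (popLoopA order temp idx).1 β
      (popLoopA order temp idx).2 := by
  induction temp, idx using popLoopA.induct order with
  | case1 temp idx h temp' h2 =>
      rw [popLoopA, if_pos h, if_pos h2]
      exact step_pop order n temp idx β h.1 h.2
  | case2 temp idx h temp' h2 ih =>
      rw [popLoopA, if_pos h, if_neg h2]
      rw [step_pop order n temp idx β h.1 h.2]; exact ih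
  | case3 temp idx h =>
      rw [popLoopA, if_neg h]

-- a stack whose top does not match the next wanted box is not popped by B
lemma loopB_no_pop (order : List Int) (temp : List Int) (idx : Nat)
    (hidx : idx < order.length)
    (hinv : temp = [] ∨ temp.getLast? ≠ PySem.List.pyGet? order (idx : Nat)) :
    temp.getLast? ≠ some order[idx] := by
  rcases hinv with h | h
  · simp [h]
  · intro hc
    exact h (by rw [hc, PySem.List.pyGet?_natCast, List.getElem?_eq_getElem hidx])

-- once the belt is exhausted B stops at the current count
lemma loopB_stuck (order : List Int) (n : Nat) (temp : List Int) (idx belt : Nat)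
    (hb : ¬ belt ≤ n)
    (hinv : temp = [] ∨ temp.getLast? ≠ PySem.List.pyGet? order (idx : Nat)) :
    loopB n (order.drop idx) temp belt idx = idx := by
  cases hd : order.drop idx with
  | nil => rw [loopB]
  | cons t rest =>
      have hidx : idx < order.length := by
        by_contra hc
        rw [List.drop_eq_nil_of_le (Nat.le_of_not_lt hc)] at hd; simp at hd
      have ht : t = order[idx] := by
        rw [List.drop_eq_getElem_cons hidx] at hd; exact (List.cons.inj hd).1.symm
      have hpl : pushLoopB n t temp belt = (temp, belt) := by
        rw [pushLoopB, if_neg (fun hc => hb hc.1)]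
      rw [loopB, if_neg (ht ▸ loopB_no_pop order temp idx hidx hinv)]
      simp only [hpl]
      rw [if_neg hb]

-- MAIN: from any state whose stack top does not match the next wanted box,
-- A's eager belt loop and B's lazy target loop compute the same count.
lemma main_sim (order : List Int) :
    ∀ (f belt : Nat) (temp : List Int) (idx : Nat),
      order.length + 1 - belt = f →
      (temp = [] ∨ temp.getLast? ≠ PySem.List.pyGet? order (idx : Nat)) →
      loopA order temp idx belt = loopB order.length (order.drop idx) temp belt idx := by
  intro f
  induction f with
  | zero =>
      intro belt temp idx hf hinv
      have hb : ¬ belt ≤ order.length := by omega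
      rw [loopA, if_neg hb, loopB_stuck order order.length temp idx belt hb hinv]
  | succ f ih =>
      intro belt temp idx hf hinv
      by_cases hb : belt ≤ order.length
      · rw [loopA, if_pos hb]
        simp only []
        rw [ih (belt + 1) (popLoopA order (temp ++ [(belt : Int)]) idx).1
            (popLoopA order (temp ++ [(belt : Int)]) idx).2 (by omega)
            (popLoopA_post order (temp ++ [(belt : Int)]) idx)]
        by_cases hmatch : PySem.List.pyGet? order ((idx : Nat) : Int) = some (belt : Int)
        · -- target = belt: B delivers directly, then pops simulate A's remaining pops
          have hidx : idx < order.length := by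
            by_contra hc
            rw [PySem.List.pyGet?_natCast, List.getElem?_eq_none (Nat.le_of_not_lt hc)] at hmatch
            simp at hmatch
          have hox : order[idx] = (belt : Int) := by
            rw [PySem.List.pyGet?_natCast, List.getElem?_eq_getElem hidx] at hmatch
            exact Option.some.inj hmatch
          have hpop1 : popLoopA order (temp ++ [(belt : Int)]) idx = popLoopA order temp (idx + 1) := by
            rw [popLoopA, if_pos ⟨by simp, by rw [List.getLast?_concat, hmatch]⟩, List.dropLast_concat]
            by_cases he : temp = []
            · rw [if_pos he, he, popLoopA, if_neg (by simp)]
            · rw [if_neg he]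
          have hpl : pushLoopB order.length order[idx] temp belt = (temp, belt) := by
            rw [pushLoopB, if_neg (fun hc => hc.2 hox.symm)]
          rw [hpop1, List.drop_eq_getElem_cons hidx, loopB,
            if_neg (hox ▸ loopB_no_pop order temp idx hidx hinv)]
          simp only [hpl]
          rw [if_pos hb]
          exact (pop_sim order order.length temp (idx + 1) (belt + 1)).symm
        · -- target ≠ belt (or no target left): A's step only pushes; B pushes the same box
          have hpop0 : popLoopA order (temp ++ [(belt : Int)]) idx = (temp ++ [(belt : Int)], idx) := by
            rw [popLoopA, if_neg (by rintro ⟨-, hc⟩; rw [List.getLast?_concat] at hc; exact hmatch hc.symm)]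
          simp only [hpop0]
          cases hd : order.drop idx with
          | nil => rw [loopB, loopB]
          | cons t rest =>
              have hidx : idx < order.length := by
                by_contra hc
                rw [List.drop_eq_nil_of_le (Nat.le_of_not_lt hc)] at hd; simp at hd
              have ht : t = order[idx] := by
                rw [List.drop_eq_getElem_cons hidx] at hd; exact (List.cons.inj hd).1.symm
              have hbt : (belt : Int) ≠ t := by
                intro hc
                exact hmatch (by rw [PySem.List.pyGet?_natCast, List.getElem?_eq_getElem hidx, ← ht, ← hc])
              have hpl : pushLoopB order.length t temp belt
                  = pushLoopB order.length t (temp ++ [(belt : Int)]) (belt + 1) := by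
                rw [pushLoopB, if_pos ⟨hb, hbt⟩]
              conv_lhs => rw [loopB,
                if_neg (show ¬(temp ++ [(belt : Int)]).getLast? = some t by
                  rw [List.getLast?_concat]; exact fun hc => hbt (Option.some.inj hc))]
              conv_rhs => rw [loopB, if_neg (ht ▸ loopB_no_pop order temp idx hidx hinv), hpl]
      · rw [loopA, if_neg hb, loopB_stuck order order.length temp idx belt hb hinv]

-- ===== VERDICT (by name: the statement is the Claim_ definition above) =====
theorem solution_spec : Claim_equal_solution := by
  intro order _
  unfold Spec_solution solution solution_alt
  rw [main_sim order (order.length + 1 - 1) 1 [] 0 rfl (Or.inl rfl), List.drop_zero]
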